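-- pv_equiv track=rewrite | github.com/cdjasonj/CCF_IE | data_process/data_process.py | _adj_sub_string
-- ===== SOURCE A (Python) =====
-- def _adj_sub_string(values):
--     """
--     传入的是字符串的list,判断是否有某个元素为另外一个元素的子串
--     从而判断是否存在没截全的情况发生
--     :param string_list:
--     :return: boolean
--     """
--     flag = 0
--     for i,value in enumerate(values):
--         for j ,_value in enumerate(values):
--             if value != _value:
--                 if value in _value:
--                     flag = 1
--     return flag
-- ===== SOURCE B (Python) =====
-- def _adj_sub_string(values):
--     # Dedupe (order-preserving), sort by length ascending, then test each string
--     # only against the strictly longer strings after it; early return on first hit.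
--     by_len = sorted(dict.fromkeys(values), key=len)
--     for i, s in enumerate(by_len):
--         for t in by_len[i + 1:]:
--             if len(s) < len(t) and s in t:
--                 return 1
--     return 0
-- ===== Notes on version B (the rewrite author's own statement) =====
-- stated objective: faster
-- what changed: Instead of A's flag-accumulating double scan over all ordered pairs (it never stops early and keeps scanning after a hit), B dedupes the list, sorts it by length and checks each string for containment only in the strictly longer strings after it, returning early on the first hit.
import Mathlib
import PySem

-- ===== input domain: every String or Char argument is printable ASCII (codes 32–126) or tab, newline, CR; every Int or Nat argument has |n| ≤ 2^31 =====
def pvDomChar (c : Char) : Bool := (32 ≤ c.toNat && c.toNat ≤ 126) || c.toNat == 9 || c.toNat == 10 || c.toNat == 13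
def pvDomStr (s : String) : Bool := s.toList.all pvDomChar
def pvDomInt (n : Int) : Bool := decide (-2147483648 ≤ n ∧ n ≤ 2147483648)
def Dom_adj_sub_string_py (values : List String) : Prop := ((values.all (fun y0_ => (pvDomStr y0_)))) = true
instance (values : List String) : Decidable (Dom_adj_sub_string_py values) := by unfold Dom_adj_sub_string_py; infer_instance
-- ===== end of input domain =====

-- B replaces A's flag-accumulating scan over all ordered pairs by dedupe + sort-by-length +
-- triangular scan with early exit (objective: alternative; equal worst-case asymptotics).


-- ===== PORT A =====
def adj_sub_string_py (values : List String) : Int :=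
  (PySem.List.enumerate values).foldl (fun flag iv =>
    (PySem.List.enumerate values).foldl (fun flag jv =>
      if iv.2 ≠ jv.2 then
        if PySem.Str.isIn iv.2 jv.2 then 1 else flag
      else flag) flag) 0

-- ===== PORT B =====
-- 'for t in by_len[i+1:]: if len(s) < len(t) and s in t: return 1' over successive tails
def pvScanLonger : List String → Int
  | [] => 0
  | s :: rest =>
    if rest.any (fun t => decide (PySem.Str.len s < PySem.Str.len t) && PySem.Str.isIn s t) then 1
    else pvScanLonger rest

def adj_sub_string_py_alt (values : List String) : Int :=
  pvScanLonger (PySem.List.sorted (PySem.List.dedup values) (fun s => PySem.Str.len s) false)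

-- ===== PRECONDITION & SPEC =====
def Spec_adj_sub_string_py (values : List String) (out : Int) : Prop := out = adj_sub_string_py_alt values
instance (values : List String) (out : Int) : Decidable (Spec_adj_sub_string_py values out) := by unfold Spec_adj_sub_string_py; infer_instance

-- ===== CLAIM (what is proved, stated in full; the proofs are below) =====
def Claim_equal_adj_sub_string_py : Prop := ∀ (values : List String), Dom_adj_sub_string_py values → Spec_adj_sub_string_py values (adj_sub_string_py values)

-- ===== LEMMAS AND PROOFS =====

-- A's pair test
def pvCA (s t : String) : Bool := decide (s ≠ t) && PySem.Str.isIn s t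
-- B's pair test
def pvCB (s t : String) : Bool := decide (PySem.Str.len s < PySem.Str.len t) && PySem.Str.isIn s t

theorem pvCA_eq_pvCB (s t : String) : pvCA s t = pvCB s t := by
  unfold pvCA pvCB
  by_cases hin : PySem.Str.isIn s t = true
  · have hinf : s.toList <:+: t.toList := (PySem.Str.isIn_iff_infix s t).1 hin
    have hle : s.toList.length ≤ t.toList.length := hinf.length_le
    simp only [hin, Bool.and_true, decide_eq_decide, PySem.Str.len_eq]
    constructor
    · intro hne
      rcases lt_or_eq_of_le hle with h | h
      · exact_mod_cast h
      · exact absurd (String.ext (hinf.eq_of_length h)) hne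
    · intro hlt heq
      subst heq
      omega
  · rw [Bool.not_eq_true] at hin
    simp only [PySem.Str.isIn] at hin
    simp [hin]

-- a flag that is only ever set to 1
theorem pv_flag_foldl {α : Type} (l : List α) (c : α → Bool) (a : Int) :
    l.foldl (fun f x => if c x then 1 else f) a = if l.any c then 1 else a := by
  induction l generalizing a with
  | nil => rfl
  | cons x xs ih => by_cases h : c x <;> simp [List.foldl_cons, List.any_cons, h, ih]

theorem pv_any_enumerate (l : List String) (p : String → Bool) :
    (PySem.List.enumerate l).any (fun jv => p jv.2) = l.any p := by
  have hm : (PySem.List.enumerate l).map Prod.snd = l := by simp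
  conv_rhs => rw [← hm, List.any_map]
  rfl

theorem pv_A_eq (values : List String) :
    adj_sub_string_py values =
      if values.any (fun s => values.any (fun t => pvCA s t)) then 1 else 0 := by
  unfold adj_sub_string_py
  have hb : ∀ s : String, (fun (flag : Int) (jv : Int × String) =>
      if s ≠ jv.2 then if PySem.Str.isIn s jv.2 then (1 : Int) else flag else flag)
      = (fun flag jv => if pvCA s jv.2 then 1 else flag) := by
    intro s
    funext flag jv
    by_cases h : s = jv.2 <;> by_cases h2 : PySem.Str.isIn s jv.2 = true <;> simp [pvCA, h]
  simp only [hb, pv_flag_foldl, pv_any_enumerate]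
  rw [pv_any_enumerate values (fun s => values.any (pvCA s))]

theorem pv_scan_eq (L : List String)
    (hp : List.Pairwise (fun a b => PySem.Str.len a ≤ PySem.Str.len b) L) :
    pvScanLonger L = if L.any (fun s => L.any (fun t => pvCB s t)) then 1 else 0 := by
  induction L with
  | nil => rfl
  | cons s rest ih =>
    rw [List.pairwise_cons] at hp
    have hCBs : ∀ x ∈ s :: rest, ¬ (pvCB x s = true) := by
      intro x hx hc
      have hle : PySem.Str.len s ≤ PySem.Str.len x := by
        rcases List.mem_cons.1 hx with h | h
        · exact h ▸ le_refl _
        · exact hp.1 x h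
      have : PySem.Str.len x < PySem.Str.len s := by
        simp only [pvCB, Bool.and_eq_true, decide_eq_true_eq] at hc
        exact hc.1
      omega
    have hstep : pvScanLonger (s :: rest) =
        if rest.any (fun t => pvCB s t) then 1 else pvScanLonger rest := rfl
    rw [hstep]
    by_cases h1 : rest.any (fun t => pvCB s t) = true
    · have h3 : (s :: rest).any (fun x => (s :: rest).any (fun t => pvCB x t)) = true := by
        rcases List.any_eq_true.1 h1 with ⟨t, ht, hct⟩
        exact List.any_eq_true.2 ⟨s, List.mem_cons_self,
          List.any_eq_true.2 ⟨t, List.mem_cons_of_mem _ ht, hct⟩⟩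
      rw [h1, h3]
      rfl
    · rw [Bool.not_eq_true] at h1
      have h1' : ∀ t ∈ rest, ¬ (pvCB s t = true) := List.any_eq_false.1 h1
      have h3 : (s :: rest).any (fun x => (s :: rest).any (fun t => pvCB x t)) =
          rest.any (fun x => rest.any (fun t => pvCB x t)) := by
        rw [Bool.eq_iff_iff]
        simp only [List.any_eq_true]
        constructor
        · rintro ⟨x, hx, t, ht, hct⟩
          rcases List.mem_cons.1 ht with rfl | ht'
          · exact absurd hct (hCBs x hx)
          rcases List.mem_cons.1 hx with rfl | hx'
          · exact absurd hct (h1' t ht')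
          · exact ⟨x, hx', t, ht', hct⟩
        · rintro ⟨x, hx, t, ht, hct⟩
          exact ⟨x, List.mem_cons_of_mem _ hx, t, List.mem_cons_of_mem _ ht, hct⟩
      rw [h1, h3, ih hp.2]
      simp

theorem pv_any_transfer (values : List String) :
    values.any (fun s => values.any (fun t => pvCA s t)) =
      (PySem.List.sorted (PySem.List.dedup values) (fun s => PySem.Str.len s) false).any
        (fun s => (PySem.List.sorted (PySem.List.dedup values) (fun s => PySem.Str.len s) false).any
          (fun t => pvCB s t)) := by
  have hmem : ∀ x : String,
      x ∈ PySem.List.sorted (PySem.List.dedup values) (fun s => PySem.Str.len s) false ↔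
        x ∈ values := by
    intro x
    rw [PySem.List.mem_sorted, PySem.List.mem_dedup]
  rw [Bool.eq_iff_iff]
  simp only [List.any_eq_true]
  constructor
  · rintro ⟨x, hx, t, ht, hct⟩
    exact ⟨x, (hmem x).2 hx, t, (hmem t).2 ht, (pvCA_eq_pvCB x t) ▸ hct⟩
  · rintro ⟨x, hx, t, ht, hct⟩
    exact ⟨x, (hmem x).1 hx, t, (hmem t).1 ht, (pvCA_eq_pvCB x t).symm ▸ hct⟩

-- ===== VERDICT (by name: the statement is the Claim_ definition above) =====
theorem adj_sub_string_py_spec : Claim_equal_adj_sub_string_py := by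
  intro values _
  unfold Spec_adj_sub_string_py adj_sub_string_py_alt
  rw [pv_A_eq, pv_scan_eq _ (PySem.List.sorted_pairwise _ _), pv_any_transfer]
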